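-- pv_equiv track=rewrite | github.com/ratrrs/variantAnnotator | annotator.py | ending_CIGAR_pos
-- ===== SOURCE A (Python) =====
-- def ending_CIGAR_pos(CIGARstring, start_pos):
--     poslist = []
--     add_pos = ''
--     end_pos = start_pos
--
--     for i in CIGARstring:
--         if i.isdigit():
--             add_pos = add_pos + i
--         else:
--             if i in 'MDN=X':  # consume reference
--                 end_pos += int(add_pos)
--                 add_pos = ''
--             else:
--                 add_pos = ''
--
--     return(end_pos-1)  # subtract 1 to make position closed/inclusive
-- ===== SOURCE B (Python) =====
-- def ending_CIGAR_pos(CIGARstring, start_pos):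
--     # two-pointer scan: parse each digit run as a slice, then dispatch on the op char
--     end_pos = start_pos
--     i, n = 0, len(CIGARstring)
--     while i < n:
--         j = i
--         while j < n and CIGARstring[j].isdigit():
--             j += 1
--         if j == n:
--             break  # trailing digit run with no op: ignored
--         if CIGARstring[j] in 'MDN=X':
--             end_pos += int(CIGARstring[i:j])
--         i = j + 1
--     return end_pos - 1
-- ===== Notes on version B (the rewrite author's own statement) =====
-- stated objective: alternative
-- what changed: B replaces A's per-character state machine (mutable accumulator string grown char by char) with an index-based two-pointer scan that slices out each whole digit run and dispatches once per operation.
import Mathlib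
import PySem

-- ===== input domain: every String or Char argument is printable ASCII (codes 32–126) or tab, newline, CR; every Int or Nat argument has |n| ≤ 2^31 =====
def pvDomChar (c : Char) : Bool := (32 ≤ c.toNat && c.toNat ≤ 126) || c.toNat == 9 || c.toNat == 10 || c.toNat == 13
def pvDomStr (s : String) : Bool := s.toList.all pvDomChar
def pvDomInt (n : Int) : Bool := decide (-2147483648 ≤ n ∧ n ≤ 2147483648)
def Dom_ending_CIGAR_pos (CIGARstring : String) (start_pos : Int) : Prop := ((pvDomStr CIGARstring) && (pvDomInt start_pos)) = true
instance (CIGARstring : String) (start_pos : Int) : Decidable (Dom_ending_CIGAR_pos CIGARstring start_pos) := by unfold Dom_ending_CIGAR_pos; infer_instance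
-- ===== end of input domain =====

-- B replaces A's per-character state machine (accumulator string grown char by char) with an
-- index-based two-pointer scan slicing out each whole digit run; objective: alternative.

-- ===== PORT A =====
-- Python's int(cs): under Pre_ the argument is a nonempty digit run, where ofStr? is some;
-- the getD 0 is only reached outside Pre_ (Python raises ValueError there).
def pyIntDigits (cs : List Char) : Int := (PySem.Int.ofStr? (String.mk cs)).getD 0

def cigarOps : List Char := ['M', 'D', 'N', '=', 'X']

-- the for-loop of A: state (add_pos, end_pos)
def aLoop : List Char → List Char → Int → Int
  | [], _, e => e
  | c :: cs, add, e =>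
    if PySem.Chars.isdigit c then aLoop cs (add ++ [c]) e
    else if c ∈ cigarOps then aLoop cs [] (e + pyIntDigits add)
    else aLoop cs [] e

def ending_CIGAR_pos (CIGARstring : String) (start_pos : Int) : Int :=
  aLoop CIGARstring.toList [] start_pos - 1

-- ===== PORT B =====
-- the while loop of B: each round takes the digit run s[i:j] and the following op char
def bLoop : List Char → Int → Int
  | cs, e =>
    let ds := cs.takeWhile PySem.Chars.isdigit
    match h : cs.dropWhile PySem.Chars.isdigit with
    | [] => e                                  -- j == n: trailing digit run ignored
    | c :: rest =>
      bLoop rest (if c ∈ cigarOps then e + pyIntDigits ds else e)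
  termination_by cs => cs.length
  decreasing_by
    have hs : (c :: rest).length ≤ cs.length := by
      simpa [h] using (cs.dropWhile_sublist (p := PySem.Chars.isdigit)).length_le
    simp at hs; omega

def ending_CIGAR_pos_alt (CIGARstring : String) (start_pos : Int) : Int :=
  bLoop CIGARstring.toList start_pos - 1

-- ===== PRECONDITION & SPEC =====
-- Pre_ excludes exactly the inputs where Python A raises ValueError (int('')): an op char in
-- 'MDN=X' not immediately preceded by a digit.
def Pre_ending_CIGAR_pos (CIGARstring : String) (start_pos : Int) : Prop :=
  ∀ i ∈ List.range CIGARstring.toList.length,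
    CIGARstring.toList.getD i ' ' ∈ cigarOps →
      0 < i ∧ PySem.Chars.isdigit (CIGARstring.toList.getD (i - 1) ' ') = true
instance (CIGARstring : String) (start_pos : Int) : Decidable (Pre_ending_CIGAR_pos CIGARstring start_pos) := by
  unfold Pre_ending_CIGAR_pos; infer_instance

def pvWitness_ending_CIGAR_pos : String × Int := ("10M2D3X4S", 5)

def Spec_ending_CIGAR_pos (CIGARstring : String) (start_pos : Int) (out : Int) : Prop := out = ending_CIGAR_pos_alt CIGARstring start_pos
instance (CIGARstring : String) (start_pos : Int) (out : Int) : Decidable (Spec_ending_CIGAR_pos CIGARstring start_pos out) := by unfold Spec_ending_CIGAR_pos; infer_instance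

-- ===== CLAIM (what is proved, stated in full; the proofs are below) =====
def Claim_equal_ending_CIGAR_pos : Prop := ∀ (CIGARstring : String) (start_pos : Int), Dom_ending_CIGAR_pos CIGARstring start_pos → Pre_ending_CIGAR_pos CIGARstring start_pos → Spec_ending_CIGAR_pos CIGARstring start_pos (ending_CIGAR_pos CIGARstring start_pos)

-- ===== LEMMAS AND PROOFS =====

theorem takeWhile_all_append_cons {α : Type} (p : α → Bool) (d : List α) (c : α) (cs : List α)
    (hd : ∀ x ∈ d, p x = true) (hc : p c = false) :
    (d ++ c :: cs).takeWhile p = d := by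
  induction d with
  | nil => simp [List.takeWhile, hc]
  | cons a d ih =>
    have ha : p a = true := hd a (by simp)
    simp [List.takeWhile_cons, ha, ih (fun x hx => hd x (by simp [hx]))]

theorem dropWhile_all_append_cons {α : Type} (p : α → Bool) (d : List α) (c : α) (cs : List α)
    (hd : ∀ x ∈ d, p x = true) (hc : p c = false) :
    (d ++ c :: cs).dropWhile p = c :: cs := by
  induction d with
  | nil => simp [List.dropWhile, hc]
  | cons a d ih =>
    have ha : p a = true := hd a (by simp)
    simp [List.dropWhile_cons, ha, ih (fun x hx => hd x (by simp [hx]))]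

theorem dropWhile_all {α : Type} (p : α → Bool) (d : List α) (hd : ∀ x ∈ d, p x = true) :
    d.dropWhile p = [] := by
  induction d with
  | nil => rfl
  | cons a d ih =>
    simp [List.dropWhile_cons, hd a (by simp), ih (fun x hx => hd x (by simp [hx]))]

theorem bLoop_drop_nil (cs : List Char) (e : Int)
    (h : cs.dropWhile PySem.Chars.isdigit = []) : bLoop cs e = e := by
  rw [bLoop]
  split
  · rfl
  · rename_i c rest heq
    rw [h] at heq; cases heq

theorem bLoop_drop_cons (cs : List Char) (c : Char) (rest : List Char) (e : Int)
    (h : cs.dropWhile PySem.Chars.isdigit = c :: rest) :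
    bLoop cs e =
      bLoop rest (if c ∈ cigarOps then e + pyIntDigits (cs.takeWhile PySem.Chars.isdigit) else e) := by
  rw [bLoop]
  split
  · rename_i heq; rw [h] at heq; cases heq
  · rename_i c' rest' heq
    rw [h] at heq
    injection heq with h1 h2
    subst h1; subst h2; rfl

theorem aLoop_eq_bLoop (cs : List Char) :
    ∀ (d : List Char) (e : Int), (∀ x ∈ d, PySem.Chars.isdigit x = true) →
      aLoop cs d e = bLoop (d ++ cs) e := by
  induction cs with
  | nil =>
    intro d e hd
    simp only [List.append_nil, aLoop]
    exact (bLoop_drop_nil d e (dropWhile_all _ _ hd)).symm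
  | cons c cs ih =>
    intro d e hd
    by_cases hc : PySem.Chars.isdigit c = true
    · have : aLoop (c :: cs) d e = aLoop cs (d ++ [c]) e := by simp [aLoop, hc]
      rw [this, ih (d ++ [c]) e (by intro x hx; rcases List.mem_append.mp hx with h | h
                                    · exact hd x h
                                    · simp at h; simpa [h] using hc)]
      simp
    · have hc' : PySem.Chars.isdigit c = false := by simpa using hc
      rw [bLoop_drop_cons _ _ _ _ (dropWhile_all_append_cons _ _ _ _ hd hc'),
        takeWhile_all_append_cons _ _ _ _ hd hc']
      by_cases hop : c ∈ cigarOps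
      · simp only [aLoop, hc', hop, if_true, if_pos hop, Bool.false_eq_true, if_false]
        rw [ih [] (e + pyIntDigits d) (by simp)]; rfl
      · simp only [aLoop, hc', hop, if_neg hop, Bool.false_eq_true, if_false]
        rw [ih [] e (by simp)]; rfl

-- ===== VERDICT (by name: the statement is the Claim_ definition above) =====
theorem ending_CIGAR_pos_spec : Claim_equal_ending_CIGAR_pos := by
  intro s e _ _
  unfold Spec_ending_CIGAR_pos ending_CIGAR_pos ending_CIGAR_pos_alt
  rw [aLoop_eq_bLoop s.toList [] e (by simp)]
  rfl
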